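-- pv_equiv track=rewrite | github.com/scipio1465/ProjectEuleroSolutions | p98.py | check_good_encoder
-- ===== SOURCE A (Python) =====
-- def check_good_encoder(w,i):
--     ## w is a word with n letters
--     ## i is a number with n digit
--     ## the encoder associate letter to digit, in ordered manner
--     ## An invalid encoder is ARISE and 99225 (9 assigned to A and R)
--
--     ll = 10*['']
--     valid = True
--     for d,l in zip(str(i),w):
--         k = ll[int(d)]
--         if not k:
--             ll[int(d)] = l
--         elif l in set(k):
--             ll[int(d)] += l
--         else:
--             ll[int(d)] += l
--             valid = False
--
--     return valid
-- ===== SOURCE B (Python) =====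
-- def check_good_encoder(w, i):
--     pairs = {p for p in zip(str(i), w)}
--     return len(pairs) == len({d for d, _ in pairs})
-- ===== Notes on version B (the rewrite author's own statement) =====
-- stated objective: simpler
-- what changed: Replaces A's 10-slot letter-accumulation loop threading a validity flag with a set comprehension of (digit-char, letter) pairs and a single cardinality comparison: the encoding is consistent iff there are exactly as many distinct pairs as distinct digit characters.
import Mathlib
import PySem

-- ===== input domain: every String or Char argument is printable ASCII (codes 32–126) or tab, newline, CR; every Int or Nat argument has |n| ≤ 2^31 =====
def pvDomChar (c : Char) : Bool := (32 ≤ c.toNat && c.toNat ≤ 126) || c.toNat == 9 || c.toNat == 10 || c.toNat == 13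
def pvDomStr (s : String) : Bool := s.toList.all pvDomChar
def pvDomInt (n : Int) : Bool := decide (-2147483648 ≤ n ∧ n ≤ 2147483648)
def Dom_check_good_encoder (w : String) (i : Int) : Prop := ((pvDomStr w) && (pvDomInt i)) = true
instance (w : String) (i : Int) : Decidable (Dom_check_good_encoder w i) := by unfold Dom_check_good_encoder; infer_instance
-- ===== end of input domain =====

-- B drops A's 10-slot grouping loop with its threaded validity flag and instead compares the
-- number of distinct (digit-char, letter) pairs with the number of distinct digit characters.

-- ===== PORT A =====
-- int(d) for a single char: exact for digit characters, which Pre_ guarantees (str(i) of i ≥ 0)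
def pvDigit (c : Char) : Nat := c.toNat - 48

-- loop body of A; ll holds Python strings as List Char; ll[int(d)] read with getD (always in range when int(d) succeeds)
def pvStepA (st : List (List Char) × Bool) (p : Char × Char) : List (List Char) × Bool :=
  let k := st.1.getD (pvDigit p.1) []
  if k = [] then (st.1.set (pvDigit p.1) [p.2], st.2)
  else if p.2 ∈ k then (st.1.set (pvDigit p.1) (k ++ [p.2]), st.2)
  else (st.1.set (pvDigit p.1) (k ++ [p.2]), false)

def check_good_encoder (w : String) (i : Int) : Bool :=
  -- zip truncates like Python's zip
  (((PySem.Int.toStr i).toList.zip w.toList).foldl pvStepA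
    (List.replicate 10 ([] : List Char), true)).2

-- ===== PORT B =====
def check_good_encoder_alt (w : String) (i : Int) : Bool :=
  let pairs : PySem.Set (Char × Char) :=
    PySem.Set.ofList ((PySem.Int.toStr i).toList.zip w.toList)
  let digits : PySem.Set Char := PySem.Set.ofList (pairs.map Prod.fst)
  PySem.Set.len pairs == PySem.Set.len digits

-- ===== PRECONDITION & SPEC =====
-- Pre_ excludes exactly the inputs where Python A raises: int('-') raises ValueError when i < 0 and w is nonempty.
def Pre_check_good_encoder (w : String) (i : Int) : Prop := w = "" ∨ 0 ≤ i
instance (w : String) (i : Int) : Decidable (Pre_check_good_encoder w i) := by unfold Pre_check_good_encoder; infer_instance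
def pvWitness_check_good_encoder : String × Int := ("arise", 99225)

def Spec_check_good_encoder (w : String) (i : Int) (out : Bool) : Prop := out = check_good_encoder_alt w i
instance (w : String) (i : Int) (out : Bool) : Decidable (Spec_check_good_encoder w i out) := by unfold Spec_check_good_encoder; infer_instance

-- ===== CLAIM (what is proved, stated in full; the proofs are below) =====
def Claim_equal_check_good_encoder : Prop := ∀ (w : String) (i : Int), Dom_check_good_encoder w i → Pre_check_good_encoder w i → Spec_check_good_encoder w i (check_good_encoder w i)

-- ===== LEMMAS AND PROOFS =====

def pvIsDigit (c : Char) : Prop := 48 ≤ c.toNat ∧ c.toNat ≤ 57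

theorem pv_digitChar_isDigit (m : Nat) (h : m < 10) : pvIsDigit (Nat.digitChar m) := by
  interval_cases m <;> exact ⟨by decide, by decide⟩

theorem pv_toDigitsCore_digits : ∀ (f n : Nat) (l : List Char),
    (∀ c ∈ l, pvIsDigit c) → ∀ c ∈ Nat.toDigitsCore 10 f n l, pvIsDigit c := by
  intro f
  induction f with
  | zero => intro n l hl c hc; exact hl c (by simpa [Nat.toDigitsCore] using hc)
  | succ f ih =>
    intro n l hl c hc
    have hl' : ∀ c ∈ (n % 10).digitChar :: l, pvIsDigit c := by
      intro c hc
      rcases List.mem_cons.mp hc with rfl | h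
      · exact pv_digitChar_isDigit _ (Nat.mod_lt _ (by omega))
      · exact hl c h
    rw [Nat.toDigitsCore] at hc
    by_cases hz : n / 10 = 0
    · rw [if_pos hz] at hc; exact hl' c hc
    · rw [if_neg hz] at hc; exact ih _ _ hl' c hc

theorem pv_toChars_digits (i : Int) (h : 0 ≤ i) : ∀ c ∈ PySem.Int.toChars i, pvIsDigit c := by
  unfold PySem.Int.toChars
  rw [if_neg (by omega)]
  exact pv_toDigitsCore_digits _ _ [] (by simp)

theorem pv_digit_inj {a b : Char} (ha : pvIsDigit a) (hb : pvIsDigit b)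
    (h : pvDigit a = pvDigit b) : a = b := by
  obtain ⟨ha1, ha2⟩ := ha
  obtain ⟨hb1, hb2⟩ := hb
  unfold pvDigit at h
  have ht : a.toNat = b.toNat := by omega
  have : a.val = b.val := by
    have := congrArg (fun n => n) ht
    exact UInt32.toNat_inj.mp ht
  exact Char.ext this

theorem pvGetD_set {α : Type} (g : List α) (d j : ℕ) (x dflt : α) :
    (g.set d x).getD j dflt = if j = d ∧ d < g.length then x else g.getD j dflt := by
  rcases eq_or_ne j d with rfl | hne
  · by_cases h2 : j < g.length
    · simp [List.getD_eq_getElem?_getD, h2]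
    · simp [List.getD_eq_getElem?_getD, h2]
  · simp [List.getD_eq_getElem?_getD, hne, (hne.symm : d ≠ j)]

theorem pv_ofList_append {α : Type} [BEq α] (l : List α) (x : α) :
    PySem.Set.ofList (l ++ [x]) = (PySem.Set.ofList l).add x := by
  rw [PySem.Set.ofList_eq_foldl, PySem.Set.ofList_eq_foldl, List.foldl_append]
  rfl

theorem pv_len_add {α : Type} [BEq α] [LawfulBEq α] (s : PySem.Set α) (x : α) :
    (s.add x).length = if x ∈ s then s.length else s.length + 1 := by
  by_cases h : x ∈ s
  · rw [PySem.Set.add_of_mem h, if_pos h]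
  · rw [PySem.Set.add_of_not_mem h, if_neg h]; simp

theorem pv_len_ofList_append {α : Type} [BEq α] [LawfulBEq α] (l : List α) (x : α) :
    (PySem.Set.ofList (l ++ [x])).length =
      if x ∈ l then (PySem.Set.ofList l).length else (PySem.Set.ofList l).length + 1 := by
  rw [pv_ofList_append, pv_len_add]
  simp [PySem.Set.mem_ofList]

theorem pv_SD_le_SP (l : List (Char × Char)) :
    (PySem.Set.ofList (l.map Prod.fst)).length ≤ (PySem.Set.ofList l).length := by
  induction l using List.reverseRecOn with
  | nil => simp
  | append_singleton l p ih =>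
    rw [List.map_append, List.map_singleton, pv_len_ofList_append, pv_len_ofList_append]
    by_cases hp : p ∈ l
    · rw [if_pos hp, if_pos (List.mem_map_of_mem hp)]
      omega
    · rw [if_neg hp]
      by_cases hd : p.1 ∈ l.map Prod.fst
      · rw [if_pos hd]; omega
      · rw [if_neg hd]; omega

theorem pv_len_ofList_congr {α : Type} [BEq α] [LawfulBEq α] (l1 l2 : List α)
    (h : ∀ x, x ∈ l1 ↔ x ∈ l2) :
    (PySem.Set.ofList l1).length = (PySem.Set.ofList l2).length := by
  apply List.Perm.length_eq
  rw [List.perm_ext_iff_of_nodup (PySem.Set.nodup_ofList _) (PySem.Set.nodup_ofList _)]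
  intro a
  rw [PySem.Set.mem_ofList, PySem.Set.mem_ofList]
  exact h a

-- invariant: A's slots record exactly the letters seen per digit of the processed prefix,
-- and A's flag equals "as many distinct pairs as distinct digit chars" on the prefix
def pvInv (pref : List (Char × Char)) (ll : List (List Char)) (valid : Bool) : Prop :=
  ll.length = 10 ∧
  (∀ j c, c ∈ ll.getD j [] ↔ ∃ d, (d, c) ∈ pref ∧ pvDigit d = j) ∧
  valid = ((PySem.Set.ofList pref).length == (PySem.Set.ofList (pref.map Prod.fst)).length)

theorem pvInv_step (pref : List (Char × Char)) (ll : List (List Char)) (valid : Bool)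
    (p : Char × Char) (hd : pvIsDigit p.1) (hpref : ∀ q ∈ pref, pvIsDigit q.1)
    (h : pvInv pref ll valid) :
    pvInv (pref ++ [p]) (pvStepA (ll, valid) p).1 (pvStepA (ll, valid) p).2 := by
  obtain ⟨hlen, hmem, hval⟩ := h
  obtain ⟨d, l⟩ := p
  have hd' : pvIsDigit d := hd
  have hj : pvDigit d < 10 := by
    obtain ⟨h1, h2⟩ := hd'; unfold pvDigit; omega
  -- slot for digit d contains exactly the letters paired with d in pref
  have hk : ∀ c, c ∈ ll.getD (pvDigit d) [] ↔ (d, c) ∈ pref := by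
    intro c
    rw [hmem]
    constructor
    · rintro ⟨d', hd'', hjd⟩
      have : d' = d := pv_digit_inj (hpref _ hd'') hd' hjd
      exact this ▸ hd''
    · intro hc; exact ⟨d, hc, rfl⟩
  have hkempty : ll.getD (pvDigit d) [] = [] ↔ d ∉ pref.map Prod.fst := by
    constructor
    · intro he hdm
      obtain ⟨q, hq, hq1⟩ := List.mem_map.mp hdm
      have hqe : q = (d, q.2) := by
        obtain ⟨qd, ql⟩ := q
        simp only at hq1
        simp [hq1]
      have hji : q.2 ∈ ll.getD (pvDigit d) [] := (hk q.2).mpr (hqe ▸ hq)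
      rw [he] at hji
      exact absurd hji (List.not_mem_nil)
    · intro hnm
      rw [List.eq_nil_iff_forall_not_mem]
      intro c hc
      exact hnm (List.mem_map_of_mem ((hk c).mp hc))
  -- generic membership conjunct for the updated slot
  have H2gen : ∀ (k' : List Char), (∀ c, c ∈ k' ↔ ((d, c) ∈ pref ∨ c = l)) →
      ∀ j c, c ∈ (ll.set (pvDigit d) k').getD j [] ↔
        ∃ d', (d', c) ∈ pref ++ [(d, l)] ∧ pvDigit d' = j := by
    intro k' hk' j c
    rw [pvGetD_set]
    by_cases hjj : j = pvDigit d ∧ pvDigit d < ll.length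
    · rw [if_pos hjj]
      rw [hk']
      constructor
      · rintro (hc | rfl)
        · exact ⟨d, List.mem_append_left _ hc, hjj.1.symm⟩
        · exact ⟨d, List.mem_append_right _ (List.mem_singleton_self _), hjj.1.symm⟩
      · rintro ⟨d'', hd'', hj''⟩
        rcases List.mem_append.mp hd'' with hin | hin
        · have : d'' = d := pv_digit_inj (hpref _ hin) hd' (by rw [hj'', hjj.1])
          exact Or.inl (this ▸ hin)
        · rw [List.mem_singleton] at hin
          injection hin with h1 h2
          exact Or.inr h2
    · rw [if_neg hjj]
      have hjne : j ≠ pvDigit d := by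
        intro he; exact hjj ⟨he, by omega⟩
      rw [hmem]
      constructor
      · rintro ⟨d'', hd'', hj''⟩; exact ⟨d'', List.mem_append_left _ hd'', hj''⟩
      · rintro ⟨d'', hd'', hj''⟩
        rcases List.mem_append.mp hd'' with hin | hin
        · exact ⟨d'', hin, hj''⟩
        · rw [List.mem_singleton] at hin
          injection hin with h1 h2
          subst h1
          exact absurd hj''.symm hjne
  -- pair/digit counts of the extended prefix
  have hSP := pv_len_ofList_append pref (d, l)
  have hSD : ((pref ++ [(d, l)]).map Prod.fst) = pref.map Prod.fst ++ [d] := by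
    simp
  have hle := pv_SD_le_SP pref
  simp only [pvStepA]
  by_cases hk0 : ll.getD (pvDigit d) [] = []
  · -- digit d unseen: both counts grow by one, the flag is untouched
    rw [if_pos hk0]
    have hdnm : d ∉ pref.map Prod.fst := hkempty.mp hk0
    have hpnm : (d, l) ∉ pref := fun hc => hdnm (List.mem_map_of_mem hc)
    refine ⟨by simp [hlen], H2gen [l] ?_, ?_⟩
    · intro c
      rw [List.mem_singleton]
      constructor
      · exact Or.inr
      · rintro (hc | rfl)
        · exact absurd ((hk c).mpr hc) (by rw [hk0]; exact List.not_mem_nil)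
        · rfl
    · show valid = _
      rw [hSP, if_neg hpnm, hSD, pv_len_ofList_append, if_neg hdnm, hval]
      by_cases he : (PySem.Set.ofList pref).length = (PySem.Set.ofList (pref.map Prod.fst)).length
      · simp [he]
      · have hne2 : (PySem.Set.ofList pref).length + 1 ≠ (PySem.Set.ofList (pref.map Prod.fst)).length + 1 := by omega
        simp
  · rw [if_neg hk0]
    have hdm : d ∈ pref.map Prod.fst := by
      by_contra hnm; exact hk0 (hkempty.mpr hnm)
    have hmemk' : ∀ c, c ∈ ll.getD (pvDigit d) [] ++ [l] ↔ ((d, c) ∈ pref ∨ c = l) := by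
      intro c
      rw [List.mem_append, List.mem_singleton, hk]
    by_cases hin : l ∈ ll.getD (pvDigit d) []
    · -- repeated pair: both counts unchanged, the flag is untouched
      rw [if_pos hin]
      have hpm : (d, l) ∈ pref := (hk l).mp hin
      refine ⟨by simp [hlen], H2gen _ hmemk', ?_⟩
      show valid = _
      rw [hSP, if_pos hpm, hSD, pv_len_ofList_append, if_pos hdm, hval]
    · -- new letter for a seen digit: pair count outgrows digit count, the flag goes false
      rw [if_neg hin]
      have hpnm : (d, l) ∉ pref := fun hc => hin ((hk l).mpr hc)
      refine ⟨by simp [hlen], H2gen _ hmemk', ?_⟩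
      show false = _
      rw [hSP, if_neg hpnm, hSD, pv_len_ofList_append, if_pos hdm]
      have : (PySem.Set.ofList pref).length + 1 ≠ (PySem.Set.ofList (pref.map Prod.fst)).length := by omega
      simp [this]

theorem pvInv_fold (ps : List (Char × Char)) :
    ∀ (pref : List (Char × Char)) (ll : List (List Char)) (valid : Bool),
      (∀ q ∈ pref ++ ps, pvIsDigit q.1) → pvInv pref ll valid →
      pvInv (pref ++ ps) (ps.foldl pvStepA (ll, valid)).1 (ps.foldl pvStepA (ll, valid)).2 := by
  induction ps with
  | nil => intro pref ll valid _ h; simpa using h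
  | cons p ps ih =>
    intro pref ll valid hq h
    have hassoc : pref ++ p :: ps = (pref ++ [p]) ++ ps := by simp
    rw [hassoc]
    have hstep := pvInv_step pref ll valid p
      (hq p (by simp)) (fun q hqm => hq q (List.mem_append_left _ hqm)) h
    have := ih (pref ++ [p]) (pvStepA (ll, valid) p).1 (pvStepA (ll, valid) p).2
      (by intro q hqm; apply hq; simpa [List.mem_append, or_assoc] using hqm) hstep
    simpa using this

theorem pvInv_init : pvInv [] (List.replicate 10 []) true := by
  refine ⟨by simp, ?_, by rfl⟩
  intro j c
  have hg : (List.replicate 10 ([] : List Char)).getD j [] = [] := by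
    rw [List.getD_eq_getElem?_getD, List.getElem?_replicate]
    split <;> rfl
  rw [hg]
  simp

-- ===== VERDICT (by name: the statement is the Claim_ definition above) =====
theorem check_good_encoder_spec : Claim_equal_check_good_encoder := by
  intro w i _ hpre
  unfold Spec_check_good_encoder check_good_encoder check_good_encoder_alt
  set ps := (PySem.Int.toStr i).toList.zip w.toList with hps
  have hdig : ∀ q ∈ ps, pvIsDigit q.1 := by
    intro q hq
    rcases hpre with hw | hi
    · subst hw
      simp only [hps] at hq
      rw [show ("" : String).toList = [] from rfl, List.zip_nil_right] at hq
      exact absurd hq (List.not_mem_nil)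
    · have hmem := (List.of_mem_zip hq).1
      rw [PySem.Int.toList_toStr] at hmem
      exact pv_toChars_digits i hi _ hmem
  have hinv := pvInv_fold ps [] (List.replicate 10 []) true (by simp only [List.nil_append]; exact hdig) pvInv_init
  rw [List.nil_append] at hinv
  rw [hinv.2.2]
  -- Nat-length equality test vs B's Int-length equality test, with B's digit set built from the pair set
  have hcongr : (PySem.Set.ofList ((PySem.Set.ofList ps).map Prod.fst)).length =
      (PySem.Set.ofList (ps.map Prod.fst)).length := by
    apply pv_len_ofList_congr
    intro x
    constructor
    · intro hx
      obtain ⟨q, hq, hq1⟩ := List.mem_map.mp hx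
      exact hq1 ▸ List.mem_map_of_mem ((PySem.Set.mem_ofList _ _).mp hq)
    · intro hx
      obtain ⟨q, hq, hq1⟩ := List.mem_map.mp hx
      exact hq1 ▸ List.mem_map_of_mem ((PySem.Set.mem_ofList _ _).mpr hq)
  simp only [PySem.Set.len, hcongr]
  by_cases he : (PySem.Set.ofList ps).length = (PySem.Set.ofList (ps.map Prod.fst)).length
  · simp [he]
  · simp [he]
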